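-- pv_equiv track=rewrite | github.com/2SOOY/problem-solving | boj_공항.py | solution
-- ===== SOURCE A (Python) =====
-- def find_root(parents, cur):
--     if cur != parents[cur]:
--         parents[cur] = find_root(parents, parents[cur])
--
--     return parents[cur]
--
-- def solution(G, planes):
--     answer = 0
--     parents = [i for i in range(G + 1)] # 다음 추가할 게이트
--
--     for plane in planes:
--         root = find_root(parents, plane)
--         # 더 이상 추가할 게이트 X
--         if root == 0:
--             break
--
--         parents[root] = root - 1 # 다음 추가할 게이트 갱신
--         answer += 1
--
--     return answer
-- ===== SOURCE B (Python) =====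
-- def solution(G, planes):
--     occupied = [False] * (G + 1)
--     answer = 0
--     for plane in planes:
--         g = plane
--         while g > 0 and occupied[g]:
--             g -= 1
--         if g == 0:
--             break
--         occupied[g] = True
--         answer += 1
--     return answer
-- ===== Notes on version B (the rewrite author's own statement) =====
-- stated objective: simpler
-- what changed: Replaces the recursive path-compressing union-find (parent-pointer array mutated by find_root) with a plain occupancy boolean array and an explicit descending scan for the highest free gate, removing the recursion and the parent bookkeeping entirely.
-- outside the precondition, e.g. on solution(2, [1, 1, 9]): A returns 1, B returns 1; on solution(1, [1, -1]): A returns 1, B returns 2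
import Mathlib
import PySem

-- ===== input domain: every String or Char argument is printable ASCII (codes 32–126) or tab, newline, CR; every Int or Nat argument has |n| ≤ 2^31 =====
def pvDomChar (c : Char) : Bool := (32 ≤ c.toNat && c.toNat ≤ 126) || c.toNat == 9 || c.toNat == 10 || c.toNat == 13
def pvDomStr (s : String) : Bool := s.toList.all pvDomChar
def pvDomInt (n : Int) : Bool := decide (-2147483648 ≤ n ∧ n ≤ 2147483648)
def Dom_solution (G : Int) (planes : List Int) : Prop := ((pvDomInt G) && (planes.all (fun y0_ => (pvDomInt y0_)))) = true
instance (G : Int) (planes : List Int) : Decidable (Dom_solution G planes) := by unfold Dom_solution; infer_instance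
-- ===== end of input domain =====

-- B replaces the recursive path-compressing union-find with a boolean occupancy array and
-- a plain descending scan for the highest free gate (objective: simpler).

-- ===== PORT A =====
-- find_root(parents, cur): recursive path-compressing find; fuel is only a totality guard
-- (within Pre_ the chain of parent pointers strictly decreases, so depth ≤ cur + 1).
def findRoot (fuel : Nat) (parents : List Int) (cur : Int) : List Int × Int :=
  match fuel with
  | 0 => (parents, PySem.List.pyGetD parents cur 0)
  | f + 1 =>
    if cur ≠ PySem.List.pyGetD parents cur 0 then
      let res := findRoot f parents (PySem.List.pyGetD parents cur 0)
      let ps := PySem.List.pySetD res.1 cur res.2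
      (ps, PySem.List.pyGetD ps cur 0)
    else (parents, PySem.List.pyGetD parents cur 0)

-- the for-loop of A (break = return the current answer)
def solLoopA (parents : List Int) (answer : Int) (planes : List Int) : Int :=
  match planes with
  | [] => answer
  | plane :: rest =>
    let res := findRoot (plane.toNat + 1) parents plane
    if res.2 = 0 then answer
    else solLoopA (PySem.List.pySetD res.1 res.2 (res.2 - 1)) (answer + 1) rest

def solution (G : Int) (planes : List Int) : Int :=
  solLoopA (PySem.List.pyRange 0 (G + 1) 1) 0 planes

-- ===== PORT B =====
-- while g > 0 and occupied[g]: g -= 1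
def scanDown (occupied : List Bool) (g : Int) : Int :=
  if h : 0 < g ∧ PySem.List.pyGetD occupied g false = true then
    scanDown occupied (g - 1)
  else g
termination_by g.toNat
decreasing_by omega

def solLoopB (occupied : List Bool) (answer : Int) (planes : List Int) : Int :=
  match planes with
  | [] => answer
  | plane :: rest =>
    let g := scanDown occupied plane
    if g = 0 then answer
    else solLoopB (PySem.List.pySetD occupied g true) (answer + 1) rest

def solution_alt (G : Int) (planes : List Int) : Int :=
  solLoopB (List.replicate (G + 1).toNat false) 0 planes

-- ===== PRECONDITION & SPEC =====
-- okPlanes G k planes: every plane names a gate in [0, G], except that entries after a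
-- guaranteed break — after a plane equal to 0, or after the k available docks are used up
-- (each processed plane either docks exactly one gate or breaks) — are unconstrained,
-- since the loop never reaches them.
def okPlanes (G : Int) : Nat → List Int → Bool
  | _, [] => true
  | k, p :: rest =>
    decide (0 ≤ p) && decide (p ≤ G) && (decide (p = 0) || decide (k = 0) || okPlanes G (k - 1) rest)

-- Pre_ admits the natural domain: every plane the loop can reach names a gate in [0, G].
-- It excludes reachable planes outside that range, on which A normally raises IndexError;
-- A still RETURNS on some such inputs — when the gates run out at a plane before the bad one
-- is reached, or when a negative plane hits Python's accidental negative-index wraparound —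
-- see claim cites.
def Pre_solution (G : Int) (planes : List Int) : Prop :=
  (0 ≤ G ∨ planes = []) ∧ okPlanes G G.toNat planes = true
instance (G : Int) (planes : List Int) : Decidable (Pre_solution G planes) := by
  unfold Pre_solution; infer_instance

def pvWitness_solution : Int × List Int := (3, [2, 3, 3])

def Spec_solution (G : Int) (planes : List Int) (out : Int) : Prop := out = solution_alt G planes
instance (G : Int) (planes : List Int) (out : Int) : Decidable (Spec_solution G planes out) := by
  unfold Spec_solution; infer_instance

-- ===== CLAIM (what is proved, stated in full; the proofs are below) =====
def Claim_equal_solution : Prop := ∀ (G : Int) (planes : List Int), Dom_solution G planes → Pre_solution G planes → Spec_solution G planes (solution G planes)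

-- ===== LEMMAS AND PROOFS =====

-- elementary facts about pyGetD / pySetD on in-range indices
theorem getD_setD {α : Type} (xs : List α) (i j : Int) (v d : α)
    (hi0 : 0 ≤ i) (_hi : i < (xs.length : Int)) (hj0 : 0 ≤ j) (hj : j < (xs.length : Int)) :
    PySem.List.pyGetD (PySem.List.pySetD xs i v) j d =
      if j = i then v else PySem.List.pyGetD xs j d := by
  rw [PySem.List.pySetD_of_nonneg xs v hi0]
  rw [PySem.List.pyGetD_eq_getElem _ d hj0 (by simpa using hj),
      PySem.List.pyGetD_eq_getElem _ d hj0 hj]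
  rw [List.getElem_set]
  by_cases h : j = i
  · simp [h]
  · have : i.toNat ≠ j.toNat := by omega
    simp [this, h]

theorem getD_replicate_false (n : Nat) (i : Int) :
    PySem.List.pyGetD (List.replicate n false) i false = false := by
  show (PySem.List.pyGet? (List.replicate n false) i).getD false = false
  cases h : PySem.List.pyGet? (List.replicate n false) i with
  | none => rfl
  | some b =>
    have hb := PySem.List.mem_of_pyGet?_eq_some _ h
    simp only [List.eq_of_mem_replicate hb]
    rfl

-- unfolding equation for scanDown
theorem scanDown_eq (occ : List Bool) (g : Int) :
    scanDown occ g =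
      if 0 < g ∧ PySem.List.pyGetD occ g false = true then scanDown occ (g - 1) else g := by
  rw [scanDown, dite_eq_ite]

theorem scan_occ_false (occ : List Bool) (g : Int)
    (h : PySem.List.pyGetD occ g false = false) : scanDown occ g = g := by
  rw [scanDown_eq]; simp [h]

theorem scan_step (occ : List Bool) (g : Int) (hg : 0 < g)
    (h : PySem.List.pyGetD occ g false = true) : scanDown occ g = scanDown occ (g - 1) := by
  rw [scanDown_eq]; simp [h, hg]

-- strong induction over nonnegative integers
theorem int_strong_ind (P : Int → Prop)
    (step : ∀ g, 0 ≤ g → (∀ g', 0 ≤ g' → g' < g → P g') → P g) :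
    ∀ g, 0 ≤ g → P g := by
  have hn : ∀ n : Nat, P (n : Int) := by
    intro n
    induction n using Nat.strong_induction_on with
    | _ n ih =>
      apply step _ (by positivity)
      intro g' h0 hlt
      have : g' = ((g'.toNat : Nat) : Int) := by omega
      rw [this]
      exact ih g'.toNat (by omega)
  intro g hg
  have : g = ((g.toNat : Nat) : Int) := by omega
  rw [this]; exact hn g.toNat

theorem scan_bounds (occ : List Bool) : ∀ g, 0 ≤ g → 0 ≤ scanDown occ g ∧ scanDown occ g ≤ g := by
  apply int_strong_ind
  intro g hg ih
  by_cases h : PySem.List.pyGetD occ g false = true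
  · by_cases hg0 : 0 < g
    · rw [scan_step occ g hg0 h]
      have := ih (g - 1) (by omega) (by omega)
      omega
    · rw [scanDown_eq]; simp [hg0]; omega
  · rw [scan_occ_false occ g (by simpa using h)]; omega

theorem scan_free (occ : List Bool) (occ0 : PySem.List.pyGetD occ 0 false = false) :
    ∀ g, 0 ≤ g → PySem.List.pyGetD occ (scanDown occ g) false = false := by
  apply int_strong_ind
  intro g hg ih
  by_cases h : PySem.List.pyGetD occ g false = true
  · by_cases hg0 : 0 < g
    · rw [scan_step occ g hg0 h]
      exact ih (g - 1) (by omega) (by omega)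
    · have : g = 0 := by omega
      subst this
      rw [scan_occ_false occ 0 occ0]; exact occ0
  · rw [scan_occ_false occ g (by simpa using h)]; simpa using h

theorem scan_idem (occ : List Bool) (occ0 : PySem.List.pyGetD occ 0 false = false)
    (g : Int) (hg : 0 ≤ g) : scanDown occ (scanDown occ g) = scanDown occ g :=
  scan_occ_false occ _ (scan_free occ occ0 g hg)

-- the invariant tying A's parent array to B's occupancy array
def InvAB (G : Int) (parents : List Int) (occ : List Bool) : Prop :=
  parents.length = (G + 1).toNat ∧ occ.length = (G + 1).toNat ∧
  PySem.List.pyGetD occ 0 false = false ∧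
  ∀ x : Int, 0 ≤ x → x ≤ G →
    (PySem.List.pyGetD occ x false = false → PySem.List.pyGetD parents x 0 = x) ∧
    (PySem.List.pyGetD occ x false = true →
      0 ≤ PySem.List.pyGetD parents x 0 ∧ PySem.List.pyGetD parents x 0 < x ∧
      scanDown occ (PySem.List.pyGetD parents x 0) = scanDown occ x)

theorem findRoot_correct (G : Int) (occ : List Bool) :
    ∀ (fuel : Nat) (parents : List Int) (x : Int), InvAB G parents occ →
      0 ≤ x → x ≤ G → x.toNat < fuel →
      (findRoot fuel parents x).2 = scanDown occ x ∧ InvAB G (findRoot fuel parents x).1 occ := by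
  intro fuel
  induction fuel with
  | zero => intro _ _ _ _ _ h; omega
  | succ f ih =>
    intro parents x hInv hx0 hxG hfuel
    obtain ⟨hlenP, hlenO, occ0, hmain⟩ := hInv
    by_cases hocc : PySem.List.pyGetD occ x false = true
    · -- occupied: parents[x] = p < x, recurse
      obtain ⟨hp0, hpx, hscan⟩ := (hmain x hx0 hxG).2 hocc
      have hne : x ≠ PySem.List.pyGetD parents x 0 := by omega
      obtain ⟨hval, hInv'⟩ := ih parents (PySem.List.pyGetD parents x 0)
        ⟨hlenP, hlenO, occ0, hmain⟩ hp0 (by omega) (by omega)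
      have hstep : findRoot (f + 1) parents x =
          (PySem.List.pySetD (findRoot f parents (PySem.List.pyGetD parents x 0)).1 x
             (findRoot f parents (PySem.List.pyGetD parents x 0)).2,
           PySem.List.pyGetD
             (PySem.List.pySetD (findRoot f parents (PySem.List.pyGetD parents x 0)).1 x
               (findRoot f parents (PySem.List.pyGetD parents x 0)).2) x 0) := by
        rw [findRoot, if_pos hne]
      rw [hstep]
      obtain ⟨hlenP', hlenO', occ0', hmain'⟩ := hInv'
      set res := findRoot f parents (PySem.List.pyGetD parents x 0) with hres
      have hxlen : x < ((PySem.List.pySetD res.1 x res.2).length : Int) := by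
        rw [PySem.List.length_pySetD, hlenP']; omega
      have hxlen1 : x < (res.1.length : Int) := by rw [hlenP']; omega
      have hget : ∀ j : Int, 0 ≤ j → j ≤ G →
          PySem.List.pyGetD (PySem.List.pySetD res.1 x res.2) j 0 =
            if j = x then res.2 else PySem.List.pyGetD res.1 j 0 := by
        intro j hj0 hjG
        exact getD_setD res.1 x j res.2 0 hx0 hxlen1 hj0 (by rw [hlenP']; omega)
      constructor
      · rw [hget x hx0 hxG, if_pos rfl, hval, hscan]
      · refine ⟨by rw [PySem.List.length_pySetD, hlenP'], hlenO', occ0', ?_⟩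
        intro y hy0 hyG
        rw [hget y hy0 hyG]
        by_cases hyx : y = x
        · subst hyx
          constructor
          · intro hf; rw [hf] at hocc; cases hocc
          · intro _
            rw [if_pos rfl, hval, hscan]
            have hb := scan_bounds occ y hy0
            have hxpos : 0 < y := by
              rcases lt_or_eq_of_le hy0 with h | h
              · exact h
              · rw [← h] at hocc; rw [occ0] at hocc; cases hocc
            have hlt : scanDown occ y < y := by
              rw [scan_step occ y hxpos hocc]
              have := scan_bounds occ (y - 1) (by omega)
              omega
            exact ⟨hb.1, hlt, scan_idem occ occ0 y hy0⟩
        · rw [if_neg hyx]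
          exact hmain' y hy0 hyG
    · -- free: parents[x] = x, return immediately
      have hx := (hmain x hx0 hxG).1 (by simpa using hocc)
      have hne : ¬ (x ≠ PySem.List.pyGetD parents x 0) := by rw [hx]; simp
      have hstep : findRoot (f + 1) parents x = (parents, PySem.List.pyGetD parents x 0) := by
        rw [findRoot, if_neg hne]
      rw [hstep]
      exact ⟨by rw [hx, scan_occ_false occ x (by simpa using hocc)],
             ⟨hlenP, hlenO, occ0, hmain⟩⟩

-- how a dock (occupying gate `root`) changes the scan function
theorem scan_update (occ : List Bool) (root : Int)
    (occ0 : PySem.List.pyGetD occ 0 false = false)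
    (hr0 : 0 < root) (hrlen : root < (occ.length : Int))
    (hfree : PySem.List.pyGetD occ root false = false) :
    ∀ g, 0 ≤ g → g < (occ.length : Int) →
      scanDown (PySem.List.pySetD occ root true) g =
        if scanDown occ g = root then scanDown occ (root - 1) else scanDown occ g := by
  have hget : ∀ j : Int, 0 ≤ j → j < (occ.length : Int) →
      PySem.List.pyGetD (PySem.List.pySetD occ root true) j false =
        if j = root then true else PySem.List.pyGetD occ j false := by
    intro j h0 h1
    exact getD_setD occ root j true false (by omega) hrlen h0 h1
  have main : ∀ g, 0 ≤ g → (g < (occ.length : Int) →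
      scanDown (PySem.List.pySetD occ root true) g =
        if scanDown occ g = root then scanDown occ (root - 1) else scanDown occ g) := by
    apply int_strong_ind
    intro g hg ih hglen
    by_cases hgr : g = root
    · subst hgr
      rw [scan_step _ g hr0 (by rw [hget g (by omega) hglen]; simp)]
      rw [scan_occ_false occ g hfree, if_pos rfl]
      by_cases hz : g - 1 = 0
      · rw [hz]
        rw [scanDown_eq, scan_occ_false occ 0 occ0]; simp
      · rw [ih (g - 1) (by omega) (by omega) (by omega)]
        have := scan_bounds occ (g - 1) (by omega)
        rw [if_neg (by omega)]
    · by_cases hocc : PySem.List.pyGetD occ g false = true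
      · by_cases hg0 : 0 < g
        · rw [scan_step _ g hg0 (by rw [hget g (by omega) hglen]; simp [hgr, hocc])]
          rw [scan_step occ g hg0 hocc]
          exact ih (g - 1) (by omega) (by omega) (by omega)
        · have : g = 0 := by omega
          subst this
          rw [occ0] at hocc; cases hocc
      · rw [scan_occ_false _ g (by rw [hget g (by omega) hglen]; simp [hgr]; simpa using hocc)]
        rw [scan_occ_false occ g (by simpa using hocc), if_neg hgr]
  intro g hg hglen
  exact main g hg hglen

-- the invariant is preserved by docking a plane at gate `root`
theorem Inv_dock (G : Int) (parents : List Int) (occ : List Bool) (root : Int)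
    (hInv : InvAB G parents occ) (hr0 : 0 < root) (hrG : root ≤ G)
    (hfree : PySem.List.pyGetD occ root false = false) :
    InvAB G (PySem.List.pySetD parents root (root - 1)) (PySem.List.pySetD occ root true) := by
  obtain ⟨hlenP, hlenO, occ0, hmain⟩ := hInv
  have hG0 : 0 ≤ G := by omega
  have hrlenO : root < (occ.length : Int) := by rw [hlenO]; omega
  have hrlenP : root < (parents.length : Int) := by rw [hlenP]; omega
  have hgetO : ∀ j : Int, 0 ≤ j → j ≤ G →
      PySem.List.pyGetD (PySem.List.pySetD occ root true) j false =
        if j = root then true else PySem.List.pyGetD occ j false := by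
    intro j h0 h1
    exact getD_setD occ root j true false (by omega) hrlenO h0 (by rw [hlenO]; omega)
  have hgetP : ∀ j : Int, 0 ≤ j → j ≤ G →
      PySem.List.pyGetD (PySem.List.pySetD parents root (root - 1)) j 0 =
        if j = root then root - 1 else PySem.List.pyGetD parents j 0 := by
    intro j h0 h1
    exact getD_setD parents root j (root - 1) 0 (by omega) hrlenP h0 (by rw [hlenP]; omega)
  have hupd := scan_update occ root occ0 hr0 hrlenO hfree
  have occ0' : PySem.List.pyGetD (PySem.List.pySetD occ root true) 0 false = false := by
    rw [hgetO 0 le_rfl hG0, if_neg (by omega)]; exact occ0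
  refine ⟨by rw [PySem.List.length_pySetD]; exact hlenP,
          by rw [PySem.List.length_pySetD]; exact hlenO, occ0', ?_⟩
  intro y hy0 hyG
  have hylen : y < (occ.length : Int) := by rw [hlenO]; omega
  rw [hgetO y hy0 hyG, hgetP y hy0 hyG]
  by_cases hyr : y = root
  · subst hyr
    rw [if_pos rfl, if_pos rfl]
    constructor
    · intro h; cases h
    · intro _
      refine ⟨by omega, by omega, ?_⟩
      -- scan₂ (root-1) = scan₂ root
      rw [scan_step (PySem.List.pySetD occ y true) y hr0
           (by rw [hgetO y (by omega) hyG]; simp)]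
  · rw [if_neg hyr, if_neg hyr]
    constructor
    · intro hf
      exact (hmain y hy0 hyG).1 hf
    · intro ht
      obtain ⟨hp0, hpy, hscan⟩ := (hmain y hy0 hyG).2 ht
      refine ⟨hp0, hpy, ?_⟩
      rw [hupd _ hp0 (by omega), hupd y hy0 hylen, hscan]
  
-- number of still-free gates among 1..G
def freeCount (G : Int) (occ : List Bool) : Nat :=
  ((Finset.Icc 1 G.toNat).filter (fun x : Nat => PySem.List.pyGetD occ (x : Int) false = false)).card

theorem freeCount_pos (G : Int) (occ : List Bool) (g : Int) (h1 : 1 ≤ g) (h2 : g ≤ G)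
    (hfree : PySem.List.pyGetD occ g false = false) : 0 < freeCount G occ := by
  apply Finset.card_pos.mpr
  refine ⟨g.toNat, Finset.mem_filter.mpr ⟨Finset.mem_Icc.mpr ⟨by omega, by omega⟩, ?_⟩⟩
  have hc : ((g.toNat : Nat) : Int) = g := by omega
  rw [hc]; exact hfree

theorem freeCount_dock (G : Int) (occ : List Bool) (root : Int)
    (hlen : occ.length = (G + 1).toNat) (h1 : 1 ≤ root) (h2 : root ≤ G)
    (hfree : PySem.List.pyGetD occ root false = false) :
    freeCount G (PySem.List.pySetD occ root true) = freeCount G occ - 1 := by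
  unfold freeCount
  have hset : (Finset.Icc 1 G.toNat).filter
        (fun x : Nat => PySem.List.pyGetD (PySem.List.pySetD occ root true) (x : Int) false = false)
      = ((Finset.Icc 1 G.toNat).filter
          (fun x : Nat => PySem.List.pyGetD occ (x : Int) false = false)).erase root.toNat := by
    ext x
    simp only [Finset.mem_filter, Finset.mem_erase, Finset.mem_Icc]
    constructor
    · rintro ⟨⟨hx1, hx2⟩, hx⟩
      rw [getD_setD occ root (x : Int) true false (by omega) (by rw [hlen]; omega) (by omega)
            (by rw [hlen]; omega)] at hx
      by_cases hxr : (x : Int) = root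
      · rw [if_pos hxr] at hx; cases hx
      · rw [if_neg hxr] at hx; exact ⟨by omega, ⟨hx1, hx2⟩, hx⟩
    · rintro ⟨hxr, ⟨hx1, hx2⟩, hx⟩
      refine ⟨⟨hx1, hx2⟩, ?_⟩
      rw [getD_setD occ root (x : Int) true false (by omega) (by rw [hlen]; omega) (by omega)
            (by rw [hlen]; omega), if_neg (by omega)]
      exact hx
  rw [hset, Finset.card_erase_of_mem
        (Finset.mem_filter.mpr ⟨Finset.mem_Icc.mpr ⟨by omega, by omega⟩, by
          have hc : ((root.toNat : Nat) : Int) = root := by omega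
          rw [hc]; exact hfree⟩)]

theorem freeCount_init (G : Int) (_hG : 0 ≤ G) :
    freeCount G (List.replicate (G + 1).toNat false) = G.toNat := by
  unfold freeCount
  have h : (Finset.Icc 1 G.toNat).filter
        (fun x : Nat => PySem.List.pyGetD (List.replicate (G + 1).toNat false) (x : Int) false = false)
      = Finset.Icc 1 G.toNat :=
    Finset.filter_true_of_mem (fun x _ => getD_replicate_false _ (x : Int))
  rw [h, Nat.card_Icc]
  omega

-- the two loops agree under the invariant
theorem loop_eq (G : Int) :
    ∀ (planes : List Int) (parents : List Int) (occ : List Bool) (answer : Int) (k : Nat),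
      okPlanes G k planes = true → freeCount G occ = k → InvAB G parents occ →
      solLoopA parents answer planes = solLoopB occ answer planes := by
  intro planes
  induction planes with
  | nil => intros; rfl
  | cons plane rest ih =>
    intro parents occ answer k hok hcount hInv
    simp only [okPlanes, Bool.and_eq_true, Bool.or_eq_true, decide_eq_true_eq] at hok
    obtain ⟨⟨hp0, hpG⟩, hrest⟩ := hok
    obtain ⟨hval, hInv'⟩ :=
      findRoot_correct G occ (plane.toNat + 1) parents plane hInv hp0 hpG (by omega)
    have occ0 : PySem.List.pyGetD occ 0 false = false := hInv.2.2.1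
    have hlenO : occ.length = (G + 1).toNat := hInv.2.1
    show (if (findRoot (plane.toNat + 1) parents plane).2 = 0 then answer
          else solLoopA _ (answer + 1) rest) =
         (if scanDown occ plane = 0 then answer else solLoopB _ (answer + 1) rest)
    rw [hval]
    by_cases hz : scanDown occ plane = 0
    · rw [if_pos hz, if_pos hz]
    · rw [if_neg hz, if_neg hz]
      have hb := scan_bounds occ plane hp0
      have hfree := scan_free occ occ0 plane hp0
      have hkpos : 0 < k :=
        hcount ▸ freeCount_pos G occ (scanDown occ plane) (by omega) (by omega) hfree
      have hplane0 : plane ≠ 0 := by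
        intro h; rw [h, scan_occ_false occ 0 occ0] at hz; exact hz rfl
      have hok' : okPlanes G (k - 1) rest = true := by
        rcases hrest with (h | h) | h
        · exact absurd h hplane0
        · omega
        · exact h
      exact ih _ _ (answer + 1) (k - 1) hok'
        (by rw [freeCount_dock G occ (scanDown occ plane) hlenO (by omega) (by omega) hfree,
                hcount])
        (Inv_dock G _ occ (scanDown occ plane) hInv' (by omega) (by omega) hfree)

theorem Inv_init (G : Int) (hG : 0 ≤ G) :
    InvAB G (PySem.List.pyRange 0 (G + 1) 1) (List.replicate (G + 1).toNat false) := by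
  have hlenP : (PySem.List.pyRange 0 (G + 1) 1).length = (G + 1).toNat := by
    rw [PySem.List.length_pyRange_one]; omega
  refine ⟨hlenP, List.length_replicate, getD_replicate_false _ 0, ?_⟩
  intro x hx0 hxG
  constructor
  · intro _
    rw [PySem.List.pyGetD_eq_getElem _ 0 hx0 (by rw [hlenP]; omega)]
    rw [PySem.List.getElem_pyRange_one 0 (G + 1) x.toNat (by rw [hlenP]; omega)]
    omega
  · intro ht
    rw [getD_replicate_false] at ht
    cases ht

-- ===== VERDICT (by name: the statement is the Claim_ definition above) =====
theorem solution_spec : Claim_equal_solution := by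
  intro G planes _ hpre
  unfold Spec_solution solution solution_alt
  rcases planes with _ | ⟨p, rest⟩
  · rfl
  · have hG : 0 ≤ G := by
      rcases hpre.1 with h | h
      · exact h
      · cases h
    exact loop_eq G (p :: rest) _ _ 0 G.toNat hpre.2 (freeCount_init G hG) (Inv_init G hG)
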